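-- pv_equiv track=rewrite | github.com/chunkstand/docling-system | app/services/docling_parser.py | _strip_repeated_header_rows
-- ===== SOURCE A (Python) =====
-- def _normalize_text(value: str | None) -> str:
--     # Docling can emit raw NUL bytes from OCR-heavy tables; Postgres rejects them in text fields.
--     return " ".join((value or "").replace("\x00", " ").split()).strip()
--
-- def _row_key(row: list[str]) -> str:
--     return " | ".join(_normalize_text(cell).lower() for cell in row).strip()
--
-- def _strip_repeated_header_rows(
--     existing_rows: list[list[str]], new_rows: list[list[str]]
-- ) -> tuple[list[list[str]], int]:
--     if not existing_rows or not new_rows: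
--         return new_rows, 0
--
--     max_header_rows = min(3, len(existing_rows), len(new_rows))
--     removed = 0
--     for header_rows in range(max_header_rows, 0, -1):
--         existing_prefix = [_row_key(row) for row in existing_rows[:header_rows]]
--         new_prefix = [_row_key(row) for row in new_rows[:header_rows]]
--         if existing_prefix == new_prefix:
--             removed = header_rows
--             break
--
--     return new_rows[removed:], removed
-- ===== SOURCE B (Python) =====
-- def _normalize_text(value):
--     return " ".join((value or "").replace("\x00", " ").split()).strip()
--
-- def _row_key(row):
--     return " | ".join(_normalize_text(cell).lower() for cell in row).strip()
--
-- def _peel(existing, remaining, budget):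
--     if budget == 0 or not existing or not remaining:
--         return remaining, 0
--     if _row_key(existing[0]) != _row_key(remaining[0]):
--         return remaining, 0
--     rest, removed = _peel(existing[1:], remaining[1:], budget - 1)
--     return rest, removed + 1
--
-- def _strip_repeated_header_rows(existing_rows, new_rows):
--     return _peel(existing_rows, new_rows, 3)
-- ===== Notes on version B (the rewrite author's own statement) =====
-- stated objective: simpler
-- what changed: Replaced A's descending try-each-window-size search (rebuilding and comparing whole key-prefix lists for header_rows = 3,2,1, then slicing off the winner) with a bounded recursive peel that walks both lists together, dropping one leading row per step while the row keys match, so the stripped tail and the count come out of one recursion with no slices or prefix lists.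
import Mathlib
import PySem

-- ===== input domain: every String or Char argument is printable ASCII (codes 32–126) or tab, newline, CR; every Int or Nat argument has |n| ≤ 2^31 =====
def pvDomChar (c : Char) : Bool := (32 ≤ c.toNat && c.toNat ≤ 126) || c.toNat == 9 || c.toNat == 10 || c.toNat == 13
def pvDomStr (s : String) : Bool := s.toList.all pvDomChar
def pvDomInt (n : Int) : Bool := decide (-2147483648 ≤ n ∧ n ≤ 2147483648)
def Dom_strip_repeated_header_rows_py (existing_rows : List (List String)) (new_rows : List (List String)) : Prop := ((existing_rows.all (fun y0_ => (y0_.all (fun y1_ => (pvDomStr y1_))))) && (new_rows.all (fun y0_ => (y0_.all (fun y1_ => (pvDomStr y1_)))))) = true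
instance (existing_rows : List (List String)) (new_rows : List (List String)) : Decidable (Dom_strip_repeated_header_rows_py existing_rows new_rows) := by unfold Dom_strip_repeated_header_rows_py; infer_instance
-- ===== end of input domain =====

-- B replaces A's descending try-each-window-size prefix-list comparison (slices + range(h,0,-1))
-- with a bounded recursive peel of at most 3 matching leading rows (simpler; same result).

-- ===== PORT A =====
-- _normalize_text: " ".join((value or "").replace("\x00", " ").split()).strip()
def pvNormalizeText (value : String) : String :=
  PySem.Str.strip (PySem.Str.join " " (PySem.Str.split₀ (PySem.Str.replace (if value = "" then "" else value) "\x00" " ")))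

-- _row_key: " | ".join(_normalize_text(cell).lower() for cell in row).strip()
def pvRowKey (row : List String) : String :=
  PySem.Str.strip (PySem.Str.join " | " (row.map (fun cell => PySem.Str.lower (pvNormalizeText cell))))

-- A's for-loop over range(max_header_rows, 0, -1) with break; removed stays 0 if no window matches
def pvLoopA (existing_rows new_rows : List (List String)) : List Int → Int
  | [] => 0
  | h :: rest =>
      let existing_prefix := (PySem.List.slice existing_rows none (some h)).map pvRowKey
      let new_prefix := (PySem.List.slice new_rows none (some h)).map pvRowKey
      if existing_prefix = new_prefix then h else pvLoopA existing_rows new_rows rest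

def strip_repeated_header_rows_py (existing_rows : List (List String)) (new_rows : List (List String)) : List (List String) × Int :=
  if existing_rows = [] ∨ new_rows = [] then (new_rows, 0)
  else
    let max_header_rows : Int := min 3 (min (existing_rows.length : Int) (new_rows.length : Int))
    let removed := pvLoopA existing_rows new_rows (PySem.List.pyRange max_header_rows 0 (-1))
    (PySem.List.slice new_rows (some removed) none, removed)

-- ===== PORT B =====
-- _peel(existing, remaining, budget): recursively drop a leading row while the keys match and budget > 0
def pvPeel : Nat → List (List String) → List (List String) → List (List String) × Int
  | 0, _, remaining => (remaining, 0)
  | _ + 1, [], remaining => (remaining, 0)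
  | _ + 1, _ :: _, [] => ([], 0)
  | b + 1, e :: es, n :: ns =>
      if pvRowKey e ≠ pvRowKey n then (n :: ns, 0)
      else
        let r := pvPeel b es ns
        (r.1, r.2 + 1)

def strip_repeated_header_rows_py_alt (existing_rows : List (List String)) (new_rows : List (List String)) : List (List String) × Int :=
  pvPeel 3 existing_rows new_rows

-- ===== PRECONDITION & SPEC =====
def Spec_strip_repeated_header_rows_py (existing_rows : List (List String)) (new_rows : List (List String)) (out : List (List String) × Int) : Prop := out = strip_repeated_header_rows_py_alt existing_rows new_rows
instance (existing_rows : List (List String)) (new_rows : List (List String)) (out : List (List String) × Int) : Decidable (Spec_strip_repeated_header_rows_py existing_rows new_rows out) := by unfold Spec_strip_repeated_header_rows_py; infer_instance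

-- ===== CLAIM (what is proved, stated in full; the proofs are below) =====
def Claim_equal_strip_repeated_header_rows_py : Prop := ∀ (existing_rows : List (List String)) (new_rows : List (List String)), Dom_strip_repeated_header_rows_py existing_rows new_rows → Spec_strip_repeated_header_rows_py existing_rows new_rows (strip_repeated_header_rows_py existing_rows new_rows)

-- ===== LEMMAS AND PROOFS =====

lemma pvRangeA1 : PySem.List.pyRange 1 0 (-1) = [1] := by
  rw [PySem.List.pyRange_neg_one]; decide
lemma pvRangeA2 : PySem.List.pyRange 2 0 (-1) = [2, 1] := by
  rw [PySem.List.pyRange_neg_one]; decide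
lemma pvRangeA3 : PySem.List.pyRange 3 0 (-1) = [3, 2, 1] := by
  rw [PySem.List.pyRange_neg_one]; decide

-- ===== VERDICT (by name: the statement is the Claim_ definition above) =====
theorem strip_repeated_header_rows_py_spec : Claim_equal_strip_repeated_header_rows_py := by
  intro existing_rows new_rows _
  unfold Spec_strip_repeated_header_rows_py
  unfold strip_repeated_header_rows_py strip_repeated_header_rows_py_alt
  rcases existing_rows with _ | ⟨e1, _ | ⟨e2, _ | ⟨e3, exr⟩⟩⟩ <;>
    rcases new_rows with _ | ⟨n1, _ | ⟨n2, _ | ⟨n3, nwr⟩⟩⟩ <;>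
    first
      | (simp [pvPeel]; done)
      | (rw [if_neg (by simp)]
         simp only [pvPeel, List.length_cons, List.length_nil]
         push_cast
         norm_num
         try rw [show min 1 ((nwr.length : Int) + 1 + 1 + 1) = 1 from by omega]
         try rw [show min 2 ((nwr.length : Int) + 1 + 1 + 1) = 2 from by omega]
         try rw [show min ((exr.length : Int) + 1 + 1 + 1) 1 = 1 from by omega]
         try rw [show min ((exr.length : Int) + 1 + 1 + 1) 2 = 2 from by omega]
         try rw [show min 3 (min ((exr.length : Int)) ((nwr.length : Int)) + 1 + 1 + 1) = 3 from by omega]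
         first | rw [pvRangeA1] | rw [pvRangeA2] | rw [pvRangeA3]
         simp only [pvLoopA]
         norm_num [PySem.List.slice_to, PySem.List.slice_from, List.take_succ_cons]
         split_ifs <;> simp_all [PySem.List.slice_from])
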